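-- pv_equiv track=rewrite | github.com/Oppads/niduc | plurality.py | epsilon_clusters
-- ===== SOURCE A (Python) =====
-- def epsilon_clusters(values, eps):
--     """
--     tworzenie clusterow
--     """
--     indexed = sorted(enumerate(values, start=1), key=lambda x: x[1])
--
--     clusters = []
--     current = [indexed[0]]
--     min_val = indexed[0][1]
--     max_val = indexed[0][1]
--
--     for idx, val in indexed[1:]:
--         new_min = min(min_val, val)
--         new_max = max(max_val, val)
--
--         if new_max - new_min > eps:
--             clusters.append(current)
--             current = [(idx, val)]
--             min_val = val
--             max_val = val
--         else:
--             current.append((idx, val))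
--             min_val = new_min
--             max_val = new_max
--
--     clusters.append(current)
--     return clusters
-- ===== SOURCE B (Python) =====
-- def epsilon_clusters(values, eps):
--     # Two-pointer clustering over the sorted list: each cluster is the maximal
--     # run whose values stay within eps of the cluster's first (smallest) value.
--     s = sorted(enumerate(values, start=1), key=lambda x: x[1])
--     clusters = []
--     while s:
--         anchor = s[0][1]
--         k = 1
--         while k < len(s) and s[k][1] - anchor <= eps:
--             k += 1
--         clusters.append(s[:k])
--         s = s[k:]
--     return clusters
-- ===== Notes on version B (the rewrite author's own statement) =====
-- stated objective: alternative
-- what changed: Replaces A's running min/max fold (state: clusters, current, min_val, max_val) with a two-pointer scan over the sorted list that cuts each cluster as the maximal run within eps of its anchor (the cluster's first, smallest value), carrying no min/max state.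
import Mathlib
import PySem

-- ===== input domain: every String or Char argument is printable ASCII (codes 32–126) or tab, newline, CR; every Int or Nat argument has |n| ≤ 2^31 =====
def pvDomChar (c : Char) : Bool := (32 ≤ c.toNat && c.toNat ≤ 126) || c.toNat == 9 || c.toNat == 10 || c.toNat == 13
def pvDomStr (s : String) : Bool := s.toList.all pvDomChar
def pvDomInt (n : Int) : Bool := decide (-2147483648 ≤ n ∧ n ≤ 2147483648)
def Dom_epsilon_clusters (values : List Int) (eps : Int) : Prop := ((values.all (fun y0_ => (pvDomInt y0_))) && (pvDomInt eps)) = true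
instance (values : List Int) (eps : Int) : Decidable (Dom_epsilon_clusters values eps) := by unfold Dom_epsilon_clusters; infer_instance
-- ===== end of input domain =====

-- B replaces A's running min/max fold with a two-pointer scan cutting maximal
-- anchor-relative runs of the sorted list (objective: alternative decomposition).

-- ===== PORT A =====
-- A's for-loop over indexed[1:] with state (clusters, current, min_val, max_val).
def epsClLoop (eps : Int) : List (Int × Int) → List (List (Int × Int)) → List (Int × Int) → Int → Int → List (List (Int × Int))
  | [], clusters, current, _, _ => clusters ++ [current]
  | (idx, v) :: rest, clusters, current, min_val, max_val =>
    let new_min := min min_val v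
    let new_max := max max_val v
    if new_max - new_min > eps then
      epsClLoop eps rest (clusters ++ [current]) [(idx, v)] v v
    else
      epsClLoop eps rest clusters (current ++ [(idx, v)]) new_min new_max

def epsilon_clusters (values : List Int) (eps : Int) : List (List (Int × Int)) :=
  match PySem.List.sorted (PySem.List.enumerate values 1) (fun x => x.2) false with
  | [] => []   -- Python raises IndexError here (indexed[0]); excluded by Pre_
  | h :: t => epsClLoop eps t [] [h] h.2 h.2

-- ===== PORT B =====
-- Source B's inner while + slices: split off the maximal run within eps of the anchor.
def splitCluster (anchor eps : Int) : List (Int × Int) → List (Int × Int) × List (Int × Int)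
  | [] => ([], [])
  | y :: ys =>
    if y.2 - anchor ≤ eps then
      let p := splitCluster anchor eps ys
      (y :: p.1, p.2)
    else ([], y :: ys)

theorem splitCluster_snd_length_le (anchor eps : Int) (l : List (Int × Int)) :
    (splitCluster anchor eps l).2.length ≤ l.length := by
  induction l with
  | nil => simp [splitCluster]
  | cons y ys ih =>
    simp only [splitCluster]
    split
    · exact Nat.le_succ_of_le ih
    · simp

def clustersOf (eps : Int) : List (Int × Int) → List (List (Int × Int))
  | [] => []
  | x :: rest =>
    (x :: (splitCluster x.2 eps rest).1) :: clustersOf eps (splitCluster x.2 eps rest).2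
termination_by l => l.length
decreasing_by
  exact Nat.lt_succ_of_le (splitCluster_snd_length_le _ _ _)

def epsilon_clusters_alt (values : List Int) (eps : Int) : List (List (Int × Int)) :=
  clustersOf eps (PySem.List.sorted (PySem.List.enumerate values 1) (fun x => x.2) false)

-- ===== PRECONDITION & SPEC =====
-- Pre_ excludes only the empty list, on which A raises IndexError at indexed[0].
def Pre_epsilon_clusters (values : List Int) (eps : Int) : Prop := values ≠ []
instance (values : List Int) (eps : Int) : Decidable (Pre_epsilon_clusters values eps) := by unfold Pre_epsilon_clusters; infer_instance
def pvWitness_epsilon_clusters : List Int × Int := ([3, 1, 4, 1, 5], 2)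

def Spec_epsilon_clusters (values : List Int) (eps : Int) (out : List (List (Int × Int))) : Prop := out = epsilon_clusters_alt values eps
instance (values : List Int) (eps : Int) (out : List (List (Int × Int))) : Decidable (Spec_epsilon_clusters values eps out) := by unfold Spec_epsilon_clusters; infer_instance

-- ===== CLAIM (what is proved, stated in full; the proofs are below) =====
def Claim_equal_epsilon_clusters : Prop := ∀ (values : List Int) (eps : Int), Dom_epsilon_clusters values eps → Pre_epsilon_clusters values eps → Spec_epsilon_clusters values eps (epsilon_clusters values eps)

-- ===== LEMMAS AND PROOFS =====

-- On a value-sorted tail, A's fold continues the current cluster exactly as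
-- B's anchor split does (min_val stays the anchor; the new value is the max).
theorem epsClLoop_eq (eps : Int) (rest : List (Int × Int)) :
    ∀ (clusters : List (List (Int × Int))) (current : List (Int × Int)) (mn mx : Int),
      mn ≤ mx → (mx :: rest.map (·.2)).Pairwise (· ≤ ·) →
      epsClLoop eps rest clusters current mn mx =
        clusters ++ (current ++ (splitCluster mn eps rest).1) ::
          clustersOf eps (splitCluster mn eps rest).2 := by
  induction rest with
  | nil =>
    intro clusters current mn mx _ _
    simp [epsClLoop, splitCluster, clustersOf]
  | cons y rs ih =>
    intro clusters current mn mx hle hpw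
    obtain ⟨i, v⟩ := y
    simp only [List.map_cons, List.pairwise_cons] at hpw
    obtain ⟨hmx, hpw'⟩ := hpw
    have hmxv : mx ≤ v := hmx v (by simp)
    have hmin : min mn v = mn := min_eq_left (le_trans hle hmxv)
    have hmax : max mx v = v := max_eq_right hmxv
    have hpwv : (v :: rs.map (·.2)).Pairwise (· ≤ ·) := List.pairwise_cons.mpr hpw'
    by_cases hc : v - mn > eps
    · have hns : ¬ (v - mn ≤ eps) := by omega
      simp only [epsClLoop, hmin, hmax, if_pos hc, splitCluster, if_neg hns]
      rw [ih (clusters ++ [current]) [(i, v)] v v le_rfl hpwv]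
      simp [clustersOf]
    · have hs : v - mn ≤ eps := by omega
      simp only [epsClLoop, hmin, hmax, if_neg hc, splitCluster, if_pos hs]
      rw [ih clusters (current ++ [(i, v)]) mn v (le_trans hle hmxv) hpwv]
      simp

-- ===== VERDICT (by name: the statement is the Claim_ definition above) =====
theorem epsilon_clusters_spec : Claim_equal_epsilon_clusters := by
  intro values eps _ hpre
  unfold Spec_epsilon_clusters epsilon_clusters epsilon_clusters_alt
  set s := PySem.List.sorted (PySem.List.enumerate values 1) (fun x => x.2) false with hs
  have hsnil : s ≠ [] := by
    rw [hs, Ne, PySem.List.sorted_eq_nil_iff]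
    intro h
    apply hpre
    have := congrArg List.length h
    simpa [PySem.List.length_enumerate] using this
  obtain ⟨h, t, hst⟩ := List.exists_cons_of_ne_nil hsnil
  have hpw : (s.map (·.2)).Pairwise (· ≤ ·) := by
    rw [hs]
    exact List.pairwise_map.mpr (PySem.List.sorted_pairwise (xs := PySem.List.enumerate values 1)
      (key := fun x : Int × Int => x.2))
  rw [hst] at hpw ⊢
  simp only [List.map_cons] at hpw
  show epsClLoop eps t [] [h] h.2 h.2 = clustersOf eps (h :: t)
  rw [epsClLoop_eq eps t [] [h] h.2 h.2 le_rfl hpw]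
  simp [clustersOf]
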